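-- pv_equiv track=rewrite | github.com/lamelameo/Algorithms-Udacity-Misc | udacity_cs215.py | create_combo_lock
-- ===== SOURCE A (Python) =====
-- def make_link(G, node1, node2):
--     if node1 not in G:
--         G[node1] = {}
--     (G[node1])[node2] = 1
--     if node2 not in G:
--         G[node2] = {}
--     (G[node2])[node1] = 1
--     return G
--
-- def create_combo_lock(nodes):
--     # nodes is a list of integers
--     G = {}
--     first_node = nodes[0]
--     prev_node = None
--     for node in nodes:
--         # exclude first node, as it has no previous node
--         if prev_node is not None:
--             # make link between each node to form chain, and add link to first node for each, to make loops
--             make_link(G, prev_node, node)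
--             make_link(G, node, first_node)
--         # update prev node to current for next loop
--         prev_node = node
--     return G
-- ===== SOURCE B (Python) =====
-- def create_combo_lock(nodes):
--     # nodes is a list of integers
--     first = nodes[0]
--     # the edge stream, in the order A's loop links them
--     edges = [e for i in range(1, len(nodes))
--                for e in ((nodes[i - 1], nodes[i]), (nodes[i], first))]
--     # group-by: outer keys = first appearance of each endpoint in the stream,
--     # inner dict of k = first appearance of each neighbour of k in the stream
--     keys = dict.fromkeys(x for e in edges for x in e)
--     return {k: dict.fromkeys((b if a == k else a
--                               for a, b in edges if a == k or b == k), 1)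
--             for k in keys}
-- ===== Notes on version B (the rewrite author's own statement) =====
-- stated objective: alternative
-- what changed: B replaces A's single stateful loop that mutates a nested dict through make_link by a declarative group-by: it materialises the edge stream once, takes the outer keys as the ordered dedup of the endpoint stream, and builds each node's adjacency dict directly as the ordered dedup of that node's neighbour occurrences in the stream, with no incremental graph dict at all. Pre_ excludes only the empty list, on which A raises IndexError.
import Mathlib
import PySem

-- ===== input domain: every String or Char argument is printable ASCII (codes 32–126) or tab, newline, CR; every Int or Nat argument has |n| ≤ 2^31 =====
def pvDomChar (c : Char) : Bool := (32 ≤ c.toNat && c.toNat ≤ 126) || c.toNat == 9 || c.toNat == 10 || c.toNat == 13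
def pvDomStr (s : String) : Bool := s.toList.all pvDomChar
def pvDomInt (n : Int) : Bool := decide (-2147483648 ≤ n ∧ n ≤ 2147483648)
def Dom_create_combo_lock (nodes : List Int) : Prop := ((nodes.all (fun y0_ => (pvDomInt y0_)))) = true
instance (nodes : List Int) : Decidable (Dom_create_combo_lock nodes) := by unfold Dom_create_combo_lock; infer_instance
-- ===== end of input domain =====

-- B replaces A's stateful make_link loop by a declarative group-by over the edge stream
-- (ordered dedup of endpoints, then each node's neighbours deduped); objective: alternative.

-- ===== PORT A =====
def make_link (G : PySem.Dict Int (PySem.Dict Int Int)) (node1 node2 : Int) :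
    PySem.Dict Int (PySem.Dict Int Int) :=
  let G := if G.contains node1 then G else G.insert node1 PySem.Dict.empty
  let G := G.modify node1 PySem.Dict.empty (fun d => d.insert node2 1)
  let G := if G.contains node2 then G else G.insert node2 PySem.Dict.empty
  G.modify node2 PySem.Dict.empty (fun d => d.insert node1 1)

def create_combo_lock (nodes : List Int) : List (Int × List (Int × Int)) :=
  match PySem.List.pyGet? nodes 0 with
  | none => []   -- IndexError on the empty list: excluded by Pre_
  | some first_node =>
    let st := nodes.foldl
      (fun (st : PySem.Dict Int (PySem.Dict Int Int) × Option Int) node =>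
        match st.2 with
        | none => (st.1, some node)
        | some prev => (make_link (make_link st.1 prev node) node first_node, some node))
      (PySem.Dict.empty, none)
    st.1.items.map (fun p => (p.1, p.2.items))

-- ===== PORT B =====
def create_combo_lock_alt (nodes : List Int) : List (Int × List (Int × Int)) :=
  match PySem.List.pyGet? nodes 0 with
  | none => []   -- IndexError on the empty list: excluded by Pre_
  | some first =>
    let edges : List (Int × Int) :=
      (PySem.List.pyRange 1 (nodes.length : Int) 1).flatMap
        (fun i =>
          [(PySem.List.pyGetD nodes (i - 1) 0, PySem.List.pyGetD nodes i 0),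
           (PySem.List.pyGetD nodes i 0, first)])
    let keys : List Int := PySem.List.dedup (edges.flatMap (fun e => [e.1, e.2]))
    keys.map (fun k =>
      (k, (PySem.List.dedup
            ((edges.filter (fun e => e.1 == k || e.2 == k)).map
              (fun e => if e.1 == k then e.2 else e.1))).map (fun v => (v, (1 : Int)))))

-- ===== PRECONDITION & SPEC =====
-- Pre_ excludes only the empty list, on which A raises IndexError (nodes[0]).
def Pre_create_combo_lock (nodes : List Int) : Prop := nodes ≠ []
instance (nodes : List Int) : Decidable (Pre_create_combo_lock nodes) := by
  unfold Pre_create_combo_lock; infer_instance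
def pvWitness_create_combo_lock : List Int := [3, 1, 2]

def Spec_create_combo_lock (nodes : List Int) (out : List (Int × List (Int × Int))) : Prop :=
  out = create_combo_lock_alt nodes
instance (nodes : List Int) (out : List (Int × List (Int × Int))) :
    Decidable (Spec_create_combo_lock nodes out) := by
  unfold Spec_create_combo_lock; infer_instance

-- ===== CLAIM (what is proved, stated in full; the proofs are below) =====
def Claim_equal_create_combo_lock : Prop :=
  ∀ (nodes : List Int), Dom_create_combo_lock nodes → Pre_create_combo_lock nodes →
    Spec_create_combo_lock nodes (create_combo_lock nodes)

-- ===== LEMMAS AND PROOFS =====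

-- the interleaved edge stream A's loop traverses: chain edge then loop edge, per node
def edgesOf (first : Int) (prev : Int) : List Int → List (Int × Int)
  | [] => []
  | x :: xs => (prev, x) :: (x, first) :: edgesOf first x xs

-- the (at most one) neighbour of k contributed by one edge
def nbContrib (k : Int) (e : Int × Int) : List Int :=
  if e.1 == k || e.2 == k then [if e.1 == k then e.2 else e.1] else []

-- A's loop from state (G, some prev) over rest computes the make_link-fold over edgesOf
lemma a_loop_eq_fold (first : Int) :
    ∀ (rest : List Int) (G : PySem.Dict Int (PySem.Dict Int Int)) (prev : Int),
      (rest.foldl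
        (fun (st : PySem.Dict Int (PySem.Dict Int Int) × Option Int) node =>
          match st.2 with
          | none => (st.1, some node)
          | some p => (make_link (make_link st.1 p node) node first, some node))
        (G, some prev)).1
      = (edgesOf first prev rest).foldl (fun G e => make_link G e.1 e.2) G := by
  intro rest
  induction rest with
  | nil => intro G prev; simp [edgesOf]
  | cons x xs ih =>
    intro G prev
    simp only [List.foldl_cons, edgesOf]
    exact ih (make_link (make_link G prev x) x first) x

-- B's edge comprehension over range(1, len) yields exactly edgesOf, index by index
lemma b_edges_eq (first : Int) (nodes : List Int) :
    ∀ (t : List Int) (j : Nat), 1 ≤ j → nodes.drop j = t →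
      (PySem.List.pyRange (j : Int) (nodes.length : Int) 1).flatMap
        (fun i =>
          [(PySem.List.pyGetD nodes (i - 1) 0, PySem.List.pyGetD nodes i 0),
           (PySem.List.pyGetD nodes i 0, first)])
      = edgesOf first (nodes.getD (j - 1) 0) t := by
  intro t
  induction t with
  | nil =>
    intro j hj hdrop
    have hlen : nodes.length ≤ j := by
      have := congrArg List.length hdrop; simp at this; omega
    have hnil : PySem.List.pyRange (j : Int) (nodes.length : Int) 1 = [] := by
      simp [PySem.List.pyRange]; omega
    simp [hnil, edgesOf]
  | cons x xs ih =>
    intro j hj hdrop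
    have hlt : j < nodes.length := by
      have := congrArg List.length hdrop; simp at this; omega
    have hdj : nodes.drop j = nodes[j] :: nodes.drop (j + 1) := List.drop_eq_getElem_cons hlt
    rw [hdj] at hdrop
    have hx : nodes.getD j 0 = x := by
      simp [List.getD_eq_getElem?_getD, List.getElem?_eq_getElem hlt,
        ((List.cons.injEq _ _ _ _).mp hdrop).1]
    have hxs : nodes.drop (j + 1) = xs := ((List.cons.injEq _ _ _ _).mp hdrop).2
    rw [PySem.List.pyRange_one_cons (by exact_mod_cast hlt)]
    rw [List.flatMap_cons]
    have hj1 : ((j : Int) + 1) = ((j + 1 : Nat) : Int) := by push_cast; ring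
    rw [hj1, ih (j + 1) (by omega) hxs]
    have hg1 : PySem.List.pyGetD nodes ((j : Int) - 1) 0 = nodes.getD (j - 1) 0 := by
      have h : ((j : Int) - 1) = ((j - 1 : Nat) : Int) := by omega
      rw [h, PySem.List.pyGetD_natCast]
    have hg2 : PySem.List.pyGetD nodes (j : Int) 0 = x := by
      rw [PySem.List.pyGetD_natCast, hx]
    rw [List.getD_eq_getElem?_getD] at hx
    simp [edgesOf, hg1, hg2, hx]

lemma keys_sd (G : PySem.Dict Int (PySem.Dict Int Int)) (a : Int) :
    (if G.contains a then G else G.insert a PySem.Dict.empty).keys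
      = PySem.Set.add G.keys a := by
  by_cases ha : G.contains a = true
  · rw [if_pos ha, PySem.Set.add_of_mem ((PySem.Dict.contains_iff_mem_keys _ _).mp ha)]
  · have ha' : G.contains a = false := by simpa using ha
    rw [if_neg (by simp [ha']), PySem.Dict.keys_insert_of_not_contains _ _ ha',
      PySem.Set.add_of_not_mem (fun hm => ha ((PySem.Dict.contains_iff_mem_keys _ _).mpr hm))]

lemma contains_sd (G : PySem.Dict Int (PySem.Dict Int Int)) (a : Int) :
    (if G.contains a then G else G.insert a PySem.Dict.empty).contains a = true := by
  by_cases ha : G.contains a = true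
  · rw [if_pos ha]; exact ha
  · rw [if_neg (by simpa using ha)]; exact PySem.Dict.contains_insert_self _ _ _

-- make_link adds its two endpoints (in order) to the key set
lemma keys_make_link (G : PySem.Dict Int (PySem.Dict Int Int)) (a b : Int) :
    (make_link G a b).keys = PySem.Set.add (PySem.Set.add G.keys a) b := by
  unfold make_link
  simp only [PySem.Dict.keys_modify, PySem.Dict.contains_modify]
  set G1 := if G.contains a then G else G.insert a PySem.Dict.empty with hG1
  set G2 := G1.modify a PySem.Dict.empty (fun d => d.insert b 1) with hG2
  have hk2 : G2.keys = PySem.Set.add G.keys a := by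
    rw [hG2, PySem.Dict.keys_modify, PySem.Dict.keys_insert_of_contains _ _ (contains_sd G a),
      keys_sd]
  by_cases hb : (b == a || G1.contains b) = true
  · rw [if_pos hb]
    have hcb : G2.contains b = true := by
      rw [hG2, PySem.Dict.contains_modify]; exact hb
    have hmem : b ∈ PySem.Set.add G.keys a := by
      rcases Bool.or_eq_true_iff.mp hb with h | h
      · exact (PySem.Set.mem_add _ _ _).mpr (Or.inr (beq_iff_eq.mp h))
      · rw [← keys_sd G a]; exact (PySem.Dict.contains_iff_mem_keys _ _).mp h
    rw [PySem.Dict.keys_insert_of_contains _ _ hcb, hk2, PySem.Set.add_of_mem hmem]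
  · have hb' : (b == a || G1.contains b) = false := by simpa using hb
    rw [if_neg (by simp [hb'])]
    have hcb : G2.contains b = false := by
      rw [hG2, PySem.Dict.contains_modify]; exact hb'
    have hc2 : (G2.insert b PySem.Dict.empty).contains b = true :=
      PySem.Dict.contains_insert_self _ _ _
    rw [PySem.Dict.keys_insert_of_contains _ _ hc2,
      PySem.Dict.keys_insert_of_not_contains _ _ hcb, hk2,
      PySem.Set.add_of_not_mem (s := PySem.Set.add G.keys a)]
    intro hm
    rcases (PySem.Set.mem_add _ _ _).mp hm with h | h
    · have : G1.contains b = true := by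
        rw [(PySem.Dict.contains_iff_mem_keys _ _)]; rw [keys_sd]; exact hm
      simp [this] at hb'
    · simp [h] at hb'

-- the key set of a make_link fold is the ordered dedup of the endpoint stream
lemma keys_fold (es : List (Int × Int)) :
    ∀ (G : PySem.Dict Int (PySem.Dict Int Int)),
      (es.foldl (fun G e => make_link G e.1 e.2) G).keys
        = PySem.Set.update G.keys (es.flatMap (fun e => [e.1, e.2])) := by
  induction es with
  | nil => intro G; simp [PySem.Set.update_nil]
  | cons e t ih =>
    intro G
    rw [List.foldl_cons, List.flatMap_cons, ih]
    simp only [List.cons_append, List.nil_append, PySem.Set.update_cons, keys_make_link]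

-- a setdefault-style insert of an empty inner dict never changes getD _ empty
lemma getD_ite_insert_empty (G : PySem.Dict Int (PySem.Dict Int Int)) (a k : Int) :
    (if G.contains a then G else G.insert a PySem.Dict.empty).getD k PySem.Dict.empty
      = G.getD k PySem.Dict.empty := by
  by_cases ha : G.contains a = true
  · rw [if_pos ha]
  · have ha' : G.contains a = false := by simpa using ha
    rw [if_neg (by simp [ha']), PySem.Dict.getD_insert]
    by_cases hk : k = a
    · rw [if_pos hk, hk, PySem.Dict.getD_of_not_contains _ _ ha']
    · rw [if_neg hk]

-- make_link's effect on one adjacency dict, as the insert-fold of nbContrib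
lemma getD_make_link (G : PySem.Dict Int (PySem.Dict Int Int)) (a b k : Int) :
    (make_link G a b).getD k PySem.Dict.empty
      = (nbContrib k (a, b)).foldl (fun d v => d.insert v 1) (G.getD k PySem.Dict.empty) := by
  unfold make_link nbContrib
  simp only [PySem.Dict.getD_modify, getD_ite_insert_empty]
  by_cases hka : k = a
  · by_cases hkb : k = b
    · subst hka; subst hkb
      simp [PySem.Dict.insert_insert_self]
    · subst hka
      have hbk : b ≠ k := fun h => hkb h.symm
      simp [hkb]
  · by_cases hkb : k = b
    · subst hkb
      have hak : a ≠ k := fun h => hka h.symm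
      simp [hka, hak]
    · have hak : a ≠ k := fun h => hka h.symm
      have hbk : b ≠ k := fun h => hkb h.symm
      simp [hka, hkb, hak, hbk]

-- the adjacency dict of k after the fold = insert-fold over k's neighbour stream
lemma getD_fold (es : List (Int × Int)) :
    ∀ (G : PySem.Dict Int (PySem.Dict Int Int)) (k : Int),
      (es.foldl (fun G e => make_link G e.1 e.2) G).getD k PySem.Dict.empty
        = (es.flatMap (nbContrib k)).foldl (fun d v => d.insert v 1)
            (G.getD k PySem.Dict.empty) := by
  induction es with
  | nil => intro G k; rfl
  | cons e t ih =>
    intro G k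
    rw [List.foldl_cons, List.flatMap_cons, List.foldl_append, ih, getD_make_link]

-- an insert-fold of constant value 1 over a stream has items = dedup(stream) paired with 1
lemma items_insfold (l : List Int) :
    (l.foldl (fun (d : PySem.Dict Int Int) v => d.insert v 1) PySem.Dict.empty).items
      = (PySem.Set.ofList l).map (fun v => (v, (1 : Int))) := by
  induction l using List.reverseRecOn with
  | nil => rfl
  | append_singleton t v ih =>
    rw [List.foldl_append, List.foldl_cons, List.foldl_nil, PySem.Set.ofList_append_singleton]
    have hkeys : (t.foldl (fun (d : PySem.Dict Int Int) v => d.insert v 1)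
        PySem.Dict.empty).keys = PySem.Set.ofList t := by
      have := PySem.Dict.keys_foldl_insert t (fun _ _ => (1 : Int)) PySem.Dict.empty
      simpa [PySem.Dict.keys_empty] using this
    by_cases hv : v ∈ t
    · have hc : (t.foldl (fun (d : PySem.Dict Int Int) v => d.insert v 1)
          PySem.Dict.empty).contains v = true := by
        rw [PySem.Dict.contains_iff_mem_keys, hkeys]
        exact (PySem.Set.mem_ofList _ _).mpr hv
      rw [PySem.Dict.items_insert_of_contains _ _ hc, ih,
        PySem.Set.add_of_mem ((PySem.Set.mem_ofList _ _).mpr hv), List.map_map]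
      apply List.map_congr_left
      intro x _
      by_cases hx : x = v <;> simp [hx]
    · have hc : (t.foldl (fun (d : PySem.Dict Int Int) v => d.insert v 1)
          PySem.Dict.empty).contains v = false := by
        rw [← Bool.not_eq_true, PySem.Dict.contains_iff_mem_keys, hkeys]
        simp [PySem.Set.mem_ofList, hv]
      rw [PySem.Dict.items_insert_of_not_contains _ _ hc, ih,
        PySem.Set.add_of_not_mem (by simp [PySem.Set.mem_ofList, hv])]
      simp

-- the neighbour stream is B's filter-then-project form
lemma nbStream_eq (k : Int) (es : List (Int × Int)) :
    es.flatMap (nbContrib k)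
      = (es.filter (fun e => e.1 == k || e.2 == k)).map
          (fun e => if e.1 == k then e.2 else e.1) := by
  induction es with
  | nil => rfl
  | cons e t ih =>
    by_cases h : (e.1 == k || e.2 == k) = true
    · simp [nbContrib, h, ih]
    · simp [nbContrib, h, ih]

lemma nodup_keys_fold (es : List (Int × Int)) :
    (es.foldl (fun G e => make_link G e.1 e.2) PySem.Dict.empty).keys.Nodup := by
  rw [keys_fold]
  simp only [PySem.Dict.keys_empty, PySem.Set.update_nil_left]
  exact PySem.Set.nodup_ofList _

-- the group-by characterisation of the whole make_link fold
lemma fold_items_char (es : List (Int × Int)) :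
    ((es.foldl (fun G e => make_link G e.1 e.2) PySem.Dict.empty).items.map
        (fun p => (p.1, p.2.items)))
      = (PySem.List.dedup (es.flatMap (fun e => [e.1, e.2]))).map (fun k =>
          (k, (PySem.List.dedup
                ((es.filter (fun e => e.1 == k || e.2 == k)).map
                  (fun e => if e.1 == k then e.2 else e.1))).map (fun v => (v, (1 : Int))))) := by
  rw [PySem.Dict.items_eq_map_keys _ (nodup_keys_fold es) PySem.Dict.empty, List.map_map]
  have hkeys : (es.foldl (fun G e => make_link G e.1 e.2) PySem.Dict.empty).keys
      = PySem.List.dedup (es.flatMap (fun e => [e.1, e.2])) := by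
    rw [keys_fold]
    simp only [PySem.Dict.keys_empty, PySem.Set.update_nil_left,
      PySem.List.dedup_eq_ofList]
  rw [hkeys]
  apply List.map_congr_left
  intro k _
  simp only [Function.comp]
  rw [getD_fold, nbStream_eq]
  have hempty : (PySem.Dict.empty : PySem.Dict Int (PySem.Dict Int Int)).getD k
      PySem.Dict.empty = PySem.Dict.empty := by
    simp [PySem.Dict.getD_empty]
  rw [hempty, items_insfold]
  simp [PySem.List.dedup_eq_ofList]

-- ===== VERDICT (by name: the statement is the Claim_ definition above) =====
theorem create_combo_lock_spec : Claim_equal_create_combo_lock := by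
  intro nodes _ hpre
  unfold Spec_create_combo_lock create_combo_lock create_combo_lock_alt
  cases nodes with
  | nil => exact absurd rfl hpre
  | cons h t =>
    have hget : PySem.List.pyGet? (h :: t) 0 = some h := by
      simp [PySem.List.pyGet?, PySem.List.pyIdx?]
    rw [hget]
    simp only
    have hB := b_edges_eq h (h :: t) t 1 (le_refl 1) (by simp)
    simp only [Nat.cast_one, Nat.sub_self, List.getD_cons_zero] at hB
    rw [hB]
    simp only [List.foldl_cons]
    rw [a_loop_eq_fold h t PySem.Dict.empty h]
    rw [fold_items_char (edgesOf h h t)]
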